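-- pv_equiv track=rewrite | github.com/singhamal07/Python | ByteByteGo/VerifySodokuBoard.py | verify_sudoku_board
-- ===== SOURCE A (Python) =====
-- from typing import List
--
-- def verify_sudoku_board(board: List[List[int]]) -> bool:
--
--     rows = [set() for _ in range(9)]
--     cols = [set() for _ in range(9)]
--     subgrids = [[set() for _ in range(3)] for _ in range(3)]
--
--     for r in range(9):
--         for c in range(9):
--             num = board[r][c]
--             if num == 0:
--                 continue
--
--             if num in rows[r]:
--                 return False
--             rows[r].add(num)
--
--             if num in cols[c]:
--                 return False
--             cols[c].add(num)
--
--             subgrid_r, subgrid_c = r // 3, c // 3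
--             if num in subgrids[subgrid_r][subgrid_c]:
--                 return False
--             subgrids[subgrid_r][subgrid_c].add(num)
--
--     return True
-- ===== SOURCE B (Python) =====
-- from typing import List
--
-- def verify_sudoku_board(board: List[List[int]]) -> bool:
--     # Stateless pairwise check: a cell conflicts iff some EARLIER cell (row-major)
--     # holds the same non-zero value and shares a row, a column or a 3x3 subgrid.
--     for r in range(9):
--         for c in range(9):
--             num = board[r][c]
--             if num == 0:
--                 continue
--             for rr in range(r + 1):
--                 for cc in range(c if rr == r else 9):
--                     if board[rr][cc] == num and (
--                         rr == r or cc == c or (rr // 3 == r // 3 and cc // 3 == c // 3)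
--                     ):
--                         return False
--     return True
-- ===== Notes on version B (the rewrite author's own statement) =====
-- stated objective: alternative
-- what changed: Replaces A's incremental bookkeeping (21 mutable seen-sets for rows/columns/subgrids, membership-test then add) by a stateless pairwise scan: each non-zero cell is compared against every earlier cell in row-major order with an explicit unit-sharing predicate (same row, same column, or same 3x3 subgrid), returning False on the first such pair.
import Mathlib
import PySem

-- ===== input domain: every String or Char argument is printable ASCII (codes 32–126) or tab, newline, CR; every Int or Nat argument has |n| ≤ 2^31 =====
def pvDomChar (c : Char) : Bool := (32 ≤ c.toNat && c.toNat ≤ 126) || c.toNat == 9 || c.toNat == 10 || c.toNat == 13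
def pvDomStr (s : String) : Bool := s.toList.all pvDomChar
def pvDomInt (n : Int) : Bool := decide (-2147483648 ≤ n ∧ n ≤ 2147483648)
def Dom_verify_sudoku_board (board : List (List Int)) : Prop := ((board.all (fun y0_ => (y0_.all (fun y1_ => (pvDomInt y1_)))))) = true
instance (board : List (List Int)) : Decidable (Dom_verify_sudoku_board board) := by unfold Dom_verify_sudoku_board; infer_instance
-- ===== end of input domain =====

-- B replaces A's incremental bookkeeping (21 mutable seen-sets, membership-test then add) by a
-- stateless pairwise scan: each non-zero cell is compared against every earlier cell with an
-- explicit unit-sharing predicate. Both Pythons raise IndexError at the same first missing cell of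
-- a ragged board; the ports read such cells as 0, which never changes a returned value.

-- ===== PORT A =====
/-- `board[r][c]` by total indexing (missing cells read as 0; a returned value never depends on
    them, since both Pythons return only before reaching any missing cell). -/
def pvCell (board : List (List Int)) (r c : Nat) : Int := (board.getD r []).getD c 0

/-- The row-major cell order of A's nested `for r in range(9): for c in range(9)` loops. -/
def pvCells : List (Nat × Nat) := (List.range 9).flatMap fun r => (List.range 9).map fun c => (r, c)

/-- A's loop, step for step: skip zeros, membership-test then add into the row set, the column set
    and the subgrid set, returning `false` on the first repeat; the 3×3 array of subgrid sets is
    kept as 9 sets, `subgrids[r//3][c//3]` being set number `3*(r//3) + c//3`. -/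
def goA (board : List (List Int)) :
    List (Nat × Nat) → List (PySem.Set Int) → List (PySem.Set Int) → List (PySem.Set Int) → Bool
  | [], _, _, _ => true
  | (r, c) :: rest, rows, cols, boxes =>
    let num := pvCell board r c
    if num = 0 then goA board rest rows cols boxes
    else if num ∈ rows.getD r [] then false
    else
      let rows' := rows.set r (PySem.Set.add (rows.getD r []) num)
      if num ∈ cols.getD c [] then false
      else
        let cols' := cols.set c (PySem.Set.add (cols.getD c []) num)
        if num ∈ boxes.getD (3 * (r / 3) + c / 3) [] then false
        else goA board rest rows' cols'
          (boxes.set (3 * (r / 3) + c / 3) (PySem.Set.add (boxes.getD (3 * (r / 3) + c / 3) []) num))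

def verify_sudoku_board (board : List (List Int)) : Bool :=
  goA board pvCells (List.replicate 9 PySem.Set.empty) (List.replicate 9 PySem.Set.empty)
    (List.replicate 9 PySem.Set.empty)

-- ===== PORT B =====
def verify_sudoku_board_alt (board : List (List Int)) : Bool :=
  (List.range 9).all fun r => (List.range 9).all fun c =>
    let num := pvCell board r c
    if num = 0 then true
    else (List.range (r + 1)).all fun rr =>
      (List.range (if rr = r then c else 9)).all fun cc =>
        !(pvCell board rr cc == num &&
          ((rr == r) || (cc == c) || ((rr / 3 == r / 3) && (cc / 3 == c / 3))))

-- ===== PRECONDITION & SPEC =====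
-- Pre_ holds exactly where the Python A returns (and excludes exactly where it raises IndexError):
-- either the first 9 rows form a full 9×9 grid, or some cell (r2,c2) reached by the row-major scan
-- (all cells before it exist) repeats the non-zero value of an earlier cell (r1,c1) of the same
-- row, column or subgrid, making A return False before any missing cell is touched.
def Pre_verify_sudoku_board (board : List (List Int)) : Prop :=
  (9 ≤ board.length ∧ ∀ r < 9, 9 ≤ (board.getD r []).length) ∨
  (∃ r2 < 9, ∃ c2 < 9, ∃ r1 < 9, ∃ c1 < 9,
    (r1 < r2 ∨ (r1 = r2 ∧ c1 < c2)) ∧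
    r2 < board.length ∧ c2 < (board.getD r2 []).length ∧
    (∀ r < r2, 9 ≤ (board.getD r []).length) ∧
    pvCell board r1 c1 ≠ 0 ∧ pvCell board r1 c1 = pvCell board r2 c2 ∧
    (r1 = r2 ∨ c1 = c2 ∨ (r1 / 3 = r2 / 3 ∧ c1 / 3 = c2 / 3)))
instance (board : List (List Int)) : Decidable (Pre_verify_sudoku_board board) := by
  unfold Pre_verify_sudoku_board; infer_instance

def pvWitness_verify_sudoku_board : List (List Int) := List.replicate 9 (List.replicate 9 0)

def Spec_verify_sudoku_board (board : List (List Int)) (out : Bool) : Prop :=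
  out = verify_sudoku_board_alt board
instance (board : List (List Int)) (out : Bool) : Decidable (Spec_verify_sudoku_board board out) := by
  unfold Spec_verify_sudoku_board; infer_instance

-- ===== CLAIM (what is proved, stated in full; the proofs are below) =====
def Claim_equal_verify_sudoku_board : Prop := ∀ (board : List (List Int)),
  Dom_verify_sudoku_board board → Pre_verify_sudoku_board board →
    Spec_verify_sudoku_board board (verify_sudoku_board board)

-- ===== LEMMAS AND PROOFS =====

/-- Subgrid number of a cell. -/
def pvBoxIdx (p : Nat × Nat) : Nat := 3 * (p.1 / 3) + p.2 / 3

/-- Two cells may carry the same non-zero value only if they share no unit. -/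
def pvNoConf (board : List (List Int)) (p q : Nat × Nat) : Prop :=
  pvCell board p.1 p.2 = pvCell board q.1 q.2 → p.1 ≠ q.1 ∧ p.2 ≠ q.2 ∧ pvBoxIdx p ≠ pvBoxIdx q

/-- Elementwise no-conflict condition: the common characterisation of both programs. -/
def pvE (board : List (List Int)) : Prop :=
  ∀ p q : Nat × Nat, p.1 < 9 → p.2 < 9 → q.1 < 9 → q.2 < 9 →
    pvCell board p.1 p.2 ≠ 0 → pvCell board q.1 q.2 ≠ 0 → p ≠ q → pvNoConf board p q

lemma pv_getD_set {α : Type} (l : List α) (i j : Nat) (x d : α) (h : i < l.length) :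
    (l.set i x).getD j d = if j = i then x else l.getD j d := by
  simp only [List.getD, List.getElem?_set]
  by_cases hj : j = i
  · subst hj; simp [h]
  · rw [if_neg (fun hh : i = j => hj hh.symm), if_neg hj]

lemma pv_getD_replicate {α : Type} (n i : Nat) (a : α) (d : α) :
    (List.replicate n a).getD i d = if i < n then a else d := by
  simp only [List.getD, List.getElem?_replicate]
  split <;> rfl

lemma pv_pairwise_iff {α : Type} {R : α → α → Prop} (l : List α) (hn : l.Nodup)
    (hs : ∀ a b, R a b → R b a) :
    l.Pairwise R ↔ ∀ a ∈ l, ∀ b ∈ l, a ≠ b → R a b :=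
  ⟨fun h _ ha _ hb hab => List.Pairwise.forall (fun _ _ h' => hs _ _ h') h ha hb hab,
   fun h => hn.pairwise_of_forall_ne h⟩

lemma pv_mem_pvCells (p : Nat × Nat) : p ∈ pvCells ↔ p.1 < 9 ∧ p.2 < 9 := by
  obtain ⟨a, b⟩ := p
  simp [pvCells]

lemma pv_noConf_symm (board : List (List Int)) (a b : Nat × Nat)
    (h : pvNoConf board a b) : pvNoConf board b a := by
  intro hv
  obtain ⟨h1, h2, h3⟩ := h hv.symm
  exact ⟨h1.symm, h2.symm, h3.symm⟩

/-- Characterisation of A's loop. -/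
lemma goA_iff (board : List (List Int)) : ∀ (ps : List (Nat × Nat))
    (rows cols boxes : List (PySem.Set Int)),
    rows.length = 9 → cols.length = 9 → boxes.length = 9 →
    (∀ p ∈ ps, p.1 < 9 ∧ p.2 < 9) →
    (goA board ps rows cols boxes = true ↔
      ((ps.filter fun p => pvCell board p.1 p.2 != 0).Pairwise (pvNoConf board) ∧
       ∀ p ∈ ps, pvCell board p.1 p.2 ≠ 0 →
         pvCell board p.1 p.2 ∉ rows.getD p.1 [] ∧
         pvCell board p.1 p.2 ∉ cols.getD p.2 [] ∧
         pvCell board p.1 p.2 ∉ boxes.getD (pvBoxIdx p) [])) := by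
  intro ps
  induction ps with
  | nil => intro rows cols boxes _ _ _ _; simp [goA]
  | cons hd rest ih =>
    obtain ⟨r, c⟩ := hd
    intro rows cols boxes hrl hcl hbl hb
    have hr9 : r < 9 := (hb (r, c) List.mem_cons_self).1
    have hc9 : c < 9 := (hb (r, c) List.mem_cons_self).2
    have hbrest : ∀ p ∈ rest, p.1 < 9 ∧ p.2 < 9 := fun p hp => hb p (List.mem_cons_of_mem _ hp)
    have hunf : goA board ((r, c) :: rest) rows cols boxes =
        (if pvCell board r c = 0 then goA board rest rows cols boxes
         else if pvCell board r c ∈ rows.getD r [] then false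
         else if pvCell board r c ∈ cols.getD c [] then false
         else if pvCell board r c ∈ boxes.getD (3 * (r / 3) + c / 3) [] then false
         else goA board rest (rows.set r (PySem.Set.add (rows.getD r []) (pvCell board r c)))
           (cols.set c (PySem.Set.add (cols.getD c []) (pvCell board r c)))
           (boxes.set (3 * (r / 3) + c / 3)
             (PySem.Set.add (boxes.getD (3 * (r / 3) + c / 3) []) (pvCell board r c)))) := rfl
    by_cases h0 : pvCell board r c = 0
    · rw [hunf, if_pos h0, ih rows cols boxes hrl hcl hbl hbrest]
      simp [h0]
    · by_cases hr : pvCell board r c ∈ rows.getD r []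
      · rw [hunf, if_neg h0, if_pos hr]
        simp only [Bool.false_eq_true, false_iff]
        rintro ⟨-, hall⟩
        exact (hall (r, c) List.mem_cons_self h0).1 hr
      · by_cases hc : pvCell board r c ∈ cols.getD c []
        · rw [hunf, if_neg h0, if_neg hr, if_pos hc]
          simp only [Bool.false_eq_true, false_iff]
          rintro ⟨-, hall⟩
          exact (hall (r, c) List.mem_cons_self h0).2.1 hc
        · by_cases hbx : pvCell board r c ∈ boxes.getD (3 * (r / 3) + c / 3) []
          · rw [hunf, if_neg h0, if_neg hr, if_neg hc, if_pos hbx]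
            simp only [Bool.false_eq_true, false_iff]
            rintro ⟨-, hall⟩
            exact (hall (r, c) List.mem_cons_self h0).2.2 hbx
          · rw [hunf, if_neg h0, if_neg hr, if_neg hc, if_neg hbx,
              ih _ _ _ (by simp [hrl]) (by simp [hcl]) (by simp [hbl]) hbrest]
            have hrow : ∀ j, ((rows.set r (PySem.Set.add (rows.getD r []) (pvCell board r c))).getD j
                ([] : List Int)) =
                if j = r then PySem.Set.add (rows.getD r []) (pvCell board r c)
                else rows.getD j [] :=
              fun j => pv_getD_set _ _ _ _ _ (by rw [hrl]; exact hr9)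
            have hcol : ∀ j, ((cols.set c (PySem.Set.add (cols.getD c []) (pvCell board r c))).getD j
                ([] : List Int)) =
                if j = c then PySem.Set.add (cols.getD c []) (pvCell board r c)
                else cols.getD j [] :=
              fun j => pv_getD_set _ _ _ _ _ (by rw [hcl]; exact hc9)
            have hbox : ∀ j, ((boxes.set (3 * (r / 3) + c / 3)
                (PySem.Set.add (boxes.getD (3 * (r / 3) + c / 3) []) (pvCell board r c))).getD j
                ([] : List Int)) =
                if j = 3 * (r / 3) + c / 3 then
                  PySem.Set.add (boxes.getD (3 * (r / 3) + c / 3) []) (pvCell board r c)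
                else boxes.getD j [] :=
              fun j => pv_getD_set _ _ _ _ _ (by rw [hbl]; omega)
            have hnz : ((r, c) :: rest).filter (fun p => pvCell board p.1 p.2 != 0) =
                (r, c) :: rest.filter (fun p => pvCell board p.1 p.2 != 0) := by
              simp [h0]
            rw [hnz, List.pairwise_cons, List.forall_mem_cons]
            simp only [hrow, hcol, hbox]
            have key : ∀ q ∈ rest, ((pvCell board q.1 q.2 ≠ 0 →
                pvCell board q.1 q.2 ∉ (if q.1 = r then
                    PySem.Set.add (rows.getD r []) (pvCell board r c) else rows.getD q.1 []) ∧
                pvCell board q.1 q.2 ∉ (if q.2 = c then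
                    PySem.Set.add (cols.getD c []) (pvCell board r c) else cols.getD q.2 []) ∧
                pvCell board q.1 q.2 ∉ (if pvBoxIdx q = 3 * (r / 3) + c / 3 then
                    PySem.Set.add (boxes.getD (3 * (r / 3) + c / 3) []) (pvCell board r c)
                  else boxes.getD (pvBoxIdx q) [])) ↔
                ((pvCell board q.1 q.2 ≠ 0 →
                  (pvCell board r c = pvCell board q.1 q.2 →
                    r ≠ q.1 ∧ c ≠ q.2 ∧ 3 * (r / 3) + c / 3 ≠ pvBoxIdx q)) ∧
                 (pvCell board q.1 q.2 ≠ 0 →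
                   pvCell board q.1 q.2 ∉ rows.getD q.1 [] ∧
                   pvCell board q.1 q.2 ∉ cols.getD q.2 [] ∧
                   pvCell board q.1 q.2 ∉ boxes.getD (pvBoxIdx q) []))) := by
              intro q _
              generalize 3 * (r / 3) + c / 3 = bh
              generalize pvBoxIdx q = bq
              by_cases e1 : q.1 = r <;> by_cases e2 : q.2 = c <;> by_cases e3 : bq = bh <;>
                simp [e1, e2, e3, PySem.Set.mem_add, ne_eq, eq_comm] <;> tauto
            constructor
            · rintro ⟨hpw, hall⟩
              refine ⟨⟨?_, hpw⟩, ⟨fun _ => ⟨hr, hc, hbx⟩, ?_⟩⟩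
              · intro q hq
                have hqm := List.mem_of_mem_filter hq
                have hqz : pvCell board q.1 q.2 ≠ 0 := by
                  have := List.of_mem_filter hq; simpa using this
                intro hv
                exact ((key q hqm).mp (hall q hqm)).1 hqz hv
              · intro q hq
                exact ((key q hq).mp (hall q hq)).2
            · rintro ⟨⟨hhead, hpw⟩, -, hall⟩
              refine ⟨hpw, fun q hq => (key q hq).mpr ⟨?_, hall q hq⟩⟩
              intro hz
              exact hhead q (List.mem_filter.mpr ⟨hq, by simpa using hz⟩)

lemma A_iff (board : List (List Int)) : verify_sudoku_board board = true ↔ pvE board := by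
  unfold verify_sudoku_board
  rw [goA_iff board pvCells _ _ _ (by simp) (by simp) (by simp) (by decide)]
  have hset : ∀ (i : Nat) (x : Int),
      x ∉ (List.replicate 9 (PySem.Set.empty : PySem.Set Int)).getD i [] := by
    intro i x
    rw [pv_getD_replicate]
    split <;> simp [PySem.Set.empty]
  have hnd : (pvCells.filter fun p => pvCell board p.1 p.2 != 0).Nodup :=
    List.Nodup.filter _ (by decide)
  constructor
  · rintro ⟨hpw, -⟩
    intro p q hp1 hp2 hq1 hq2 hpz hqz hne
    exact (pv_pairwise_iff _ hnd (pv_noConf_symm board)).mp hpw p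
      (List.mem_filter.mpr ⟨(pv_mem_pvCells p).mpr ⟨hp1, hp2⟩, by simpa using hpz⟩) q
      (List.mem_filter.mpr ⟨(pv_mem_pvCells q).mpr ⟨hq1, hq2⟩, by simpa using hqz⟩) hne
  · intro hE
    refine ⟨(pv_pairwise_iff _ hnd (pv_noConf_symm board)).mpr ?_,
      fun p _ _ => ⟨hset _ _, hset _ _, hset _ _⟩⟩
    intro a ha b hb hab
    have ha' := (pv_mem_pvCells a).mp (List.mem_of_mem_filter ha)
    have hb' := (pv_mem_pvCells b).mp (List.mem_of_mem_filter hb)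
    have haz : pvCell board a.1 a.2 ≠ 0 := by have := List.of_mem_filter ha; simpa using this
    have hbz : pvCell board b.1 b.2 ≠ 0 := by have := List.of_mem_filter hb; simpa using this
    exact hE a b ha'.1 ha'.2 hb'.1 hb'.2 haz hbz hab

lemma B_cell_iff (board : List (List Int)) (r c rr cc : Nat) :
    ((!(pvCell board rr cc == pvCell board r c &&
        ((rr == r) || (cc == c) || ((rr / 3 == r / 3) && (cc / 3 == c / 3))))) = true) ↔
      ¬(pvCell board rr cc = pvCell board r c ∧
        (rr = r ∨ cc = c ∨ (rr / 3 = r / 3 ∧ cc / 3 = c / 3))) := by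
  simp [-not_and, not_and']
  tauto

lemma B_iff (board : List (List Int)) : verify_sudoku_board_alt board = true ↔ pvE board := by
  unfold verify_sudoku_board_alt
  simp only [List.all_eq_true, List.mem_range]
  constructor
  · intro hB
    have main : ∀ a b : Nat × Nat, a.1 < 9 → a.2 < 9 → pvCell board a.1 a.2 ≠ 0 →
        (b.1 < a.1 ∨ (b.1 = a.1 ∧ b.2 < a.2)) → b.2 < 9 →
        pvCell board b.1 b.2 = pvCell board a.1 a.2 →
        ¬(b.1 = a.1 ∨ b.2 = a.2 ∨ (b.1 / 3 = a.1 / 3 ∧ b.2 / 3 = a.2 / 3)) := by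
      intro a b ha1 ha2 haz hearl hb2 hveq hshare
      have h1 := hB a.1 ha1 a.2 ha2
      rw [if_neg haz, List.all_eq_true] at h1
      have h2 := h1 b.1 (by rw [List.mem_range]; omega)
      rw [List.all_eq_true] at h2
      have h3 := h2 b.2 (by rw [List.mem_range]; split <;> omega)
      rw [B_cell_iff] at h3
      exact h3 ⟨hveq, hshare⟩
    intro p q hp1 hp2 hq1 hq2 hpz hqz hne hv
    have hne' : ¬(p.1 = q.1 ∧ p.2 = q.2) := fun hh => hne (Prod.ext hh.1 hh.2)
    have htri : (q.1 < p.1 ∨ (q.1 = p.1 ∧ q.2 < p.2)) ∨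
        (p.1 < q.1 ∨ (p.1 = q.1 ∧ p.2 < q.2)) := by omega
    rcases htri with hqe | hpe
    · have hnsh := main p q hp1 hp2 hpz hqe hq2 hv.symm
      refine ⟨fun e => hnsh (Or.inl e.symm), fun e => hnsh (Or.inr (Or.inl e.symm)), ?_⟩
      intro e
      apply hnsh
      right; right
      simp only [pvBoxIdx] at e
      omega
    · have hnsh := main q p hq1 hq2 hqz hpe hp2 hv
      refine ⟨fun e => hnsh (Or.inl e), fun e => hnsh (Or.inr (Or.inl e)), ?_⟩
      intro e
      apply hnsh
      right; right
      simp only [pvBoxIdx] at e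
      omega
  · intro hE r hr c hc
    by_cases h0 : pvCell board r c = 0
    · simp [h0]
    · rw [if_neg h0]
      simp only [List.all_eq_true, List.mem_range]
      intro rr hrr cc hcc
      rw [B_cell_iff]
      rintro ⟨hveq, hshare⟩
      have hcc9 : cc < 9 := by
        by_cases e : rr = r
        · rw [if_pos e] at hcc; omega
        · rw [if_neg e] at hcc; omega
      have hearl : rr < r ∨ (rr = r ∧ cc < c) := by
        by_cases e : rr = r
        · rw [if_pos e] at hcc; right; exact ⟨e, hcc⟩
        · left; omega
      have hne : (r, c) ≠ (rr, cc) := fun hh => by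
        rw [Prod.mk.injEq] at hh; omega
      have hqz : pvCell board rr cc ≠ 0 := by rw [hveq]; exact h0
      obtain ⟨t1, t2, t3⟩ := hE (r, c) (rr, cc) hr hc (by omega) hcc9 h0 hqz hne hveq.symm
      rcases hshare with h | h | ⟨ha, hb⟩
      · exact t1 h.symm
      · exact t2 h.symm
      · apply t3
        simp only [pvBoxIdx]
        omega

-- ===== VERDICT (by name: the statement is the Claim_ definition above) =====
theorem verify_sudoku_board_spec : Claim_equal_verify_sudoku_board := by
  intro board _ _
  unfold Spec_verify_sudoku_board
  have h := (A_iff board).trans (B_iff board).symm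
  cases hA : verify_sudoku_board board with
  | true => exact (h.mp hA).symm
  | false =>
    cases hB : verify_sudoku_board_alt board with
    | true => exact absurd (h.mpr hB) (by simp [hA])
    | false => rfl
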